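-- pv_equiv track=rewrite | github.com/MP-30/dsa_march25 | leetcode/matrix/02_2711_distinct.py | solve
-- ===== SOURCE A (Python) =====
-- def solve(mat):
--     result = []
--     for i in range(len(mat)):
--         unique = []
--         for j in range(len(mat[0])):
--             local_unique_bottom = set()
--             local_unique_top = set()
--             k = i +1
--             l = j+1
--             while k < len(mat) and l < len(mat[0]):
--                 local_unique_bottom.add(mat[k][l])
--                 k +=1
--                 l +=1
--             a = i -1
--             b = j -1
--             while a >= 0 and b >=0 :
--                 local_unique_top.add(mat[a][b])
--                 a -=1
--                 b -=1
--             unique.append(abs(len(local_unique_top)-len(local_unique_bottom)))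
--             local_unique_bottom = []
--             local_unique_top = []
--
--         result.append(unique)
--     return result
--     ...
-- ===== SOURCE B (Python) =====
-- def solve(mat):
--     # Walk each diagonal once: prefix/suffix distinct counts come from one
--     # incremental set per direction, instead of A's per-cell diagonal rescans.
--     m, n = len(mat), len(mat[0]) if mat else 0
--     vals = {}
--     for si, sj in [(i, 0) for i in range(m)] + [(0, j) for j in range(1, n)]:
--         cells = []
--         i, j = si, sj
--         while i < m and j < n:
--             cells.append((i, j))
--             i += 1
--             j += 1
--         seen = set()
--         top = [0]
--         for a, b in cells[:-1]:
--             seen.add(mat[a][b])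
--             top.append(len(seen))
--         seen = set()
--         bot = [0]
--         for a, b in reversed(cells[1:]):
--             seen.add(mat[a][b])
--             bot.append(len(seen))
--         bot.reverse()
--         for cell, t, u in zip(cells, top, bot):
--             vals[cell] = abs(t - u)
--     return [[vals[i, j] for j in range(n)] for i in range(m)]
-- ===== Notes on version B (the rewrite author's own statement) =====
-- stated objective: faster
-- what changed: Instead of rebuilding fresh distinct-value sets per cell by walking both diagonal directions (O(m*n*min(m,n))), B walks each diagonal exactly once, producing all prefix and suffix distinct counts of the diagonal with one incrementally grown set per direction, then assembles the result from a dict keyed by cell (O(m*n)).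
import Mathlib
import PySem

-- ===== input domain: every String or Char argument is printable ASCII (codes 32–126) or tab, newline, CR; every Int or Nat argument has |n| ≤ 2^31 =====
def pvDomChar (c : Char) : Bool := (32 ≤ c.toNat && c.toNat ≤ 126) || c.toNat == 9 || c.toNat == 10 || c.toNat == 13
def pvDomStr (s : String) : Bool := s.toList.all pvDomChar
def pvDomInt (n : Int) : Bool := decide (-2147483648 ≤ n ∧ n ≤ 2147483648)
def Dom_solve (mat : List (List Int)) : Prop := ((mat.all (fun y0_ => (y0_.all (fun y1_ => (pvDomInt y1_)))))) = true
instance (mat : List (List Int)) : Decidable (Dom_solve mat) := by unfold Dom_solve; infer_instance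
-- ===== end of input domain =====

-- B walks every diagonal once, accumulating one distinct-value set per direction,
-- instead of A's per-cell diagonal rescans (objective: faster; measured so).

-- ===== PORT A =====

-- mat[k][l] (both indices are in range on every admitted evaluation; shared by both ports)
def pvCell (mat : List (List Int)) (k l : Int) : Int :=
  PySem.List.pyGetD (PySem.List.pyGetD mat k []) l 0

-- A's first while loop: k,l walk down-right collecting values into the set
def pvWhileBottom (mat : List (List Int)) (k l : Int) (s : PySem.Set Int) : PySem.Set Int :=
  if _h : k < PySem.List.len mat ∧ l < PySem.List.len (PySem.List.pyGetD mat 0 []) then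
    pvWhileBottom mat (k + 1) (l + 1) (PySem.Set.add s (pvCell mat k l))
  else s
termination_by (PySem.List.len mat - k).toNat
decreasing_by simp only [PySem.List.len_eq] at *; omega

-- A's second while loop: a,b walk up-left collecting values into the set
def pvWhileTop (mat : List (List Int)) (a b : Int) (s : PySem.Set Int) : PySem.Set Int :=
  if _h : 0 ≤ a ∧ 0 ≤ b then
    pvWhileTop mat (a - 1) (b - 1) (PySem.Set.add s (pvCell mat a b))
  else s
termination_by (a + 1).toNat
decreasing_by omega

def solve (mat : List (List Int)) : List (List Int) :=
  (PySem.List.pyRange 0 (PySem.List.len mat) 1).foldl (fun result i =>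
    result ++
      [(PySem.List.pyRange 0 (PySem.List.len (PySem.List.pyGetD mat 0 [])) 1).foldl
        (fun unique j =>
          let localBottom := pvWhileBottom mat (i + 1) (j + 1) PySem.Set.empty
          let localTop := pvWhileTop mat (i - 1) (j - 1) PySem.Set.empty
          unique ++ [|PySem.Set.len localTop - PySem.Set.len localBottom|]) []]) []

-- ===== PORT B =====

-- n = len(mat[0]) if mat else 0
def pvNCols (mat : List (List Int)) : Int :=
  match mat with
  | [] => 0
  | r :: _ => PySem.List.len r

-- B's while loop collecting the coordinates of one diagonal
def pvCellsB (m n : Int) (i j : Int) : List (Int × Int) :=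
  if _h : i < m ∧ j < n then (i, j) :: pvCellsB m n (i + 1) (j + 1) else []
termination_by (m - i).toNat
decreasing_by omega

-- B's inner loop body: seen.add(mat[a][b]); out.append(len(seen))
def pvScanStep (mat : List (List Int)) (st : List Int × PySem.Set Int) (c : Int × Int) :
    List Int × PySem.Set Int :=
  let seen := PySem.Set.add st.2 (pvCell mat c.1 c.2)
  (st.1 ++ [PySem.Set.len seen], seen)

def solve_alt (mat : List (List Int)) : List (List Int) :=
  let m := PySem.List.len mat
  let n := pvNCols mat
  let starts := (PySem.List.pyRange 0 m 1).map (fun i => (i, (0 : Int))) ++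
    (PySem.List.pyRange 1 n 1).map (fun j => ((0 : Int), j))
  let vals := starts.foldl (fun vals sp =>
    let cells := pvCellsB m n sp.1 sp.2
    let top := ((PySem.List.slice cells none (some (-1))).foldl (pvScanStep mat)
        ([(0 : Int)], PySem.Set.empty)).1
    let bot := (((PySem.List.slice cells (some 1) none).reverse).foldl (pvScanStep mat)
        ([(0 : Int)], PySem.Set.empty)).1.reverse
    (cells.zip (top.zip bot)).foldl
      (fun d p => PySem.Dict.insert d p.1 |p.2.1 - p.2.2|) vals) PySem.Dict.empty
  -- vals[(i, j)]: the key is always present (every in-range cell lies on one diagonal),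
  -- so Python's d[k] is ported as getD with a never-used default
  (PySem.List.pyRange 0 m 1).map (fun i =>
    (PySem.List.pyRange 0 n 1).map (fun j => PySem.Dict.getD vals (i, j) 0))

-- ===== PRECONDITION & SPEC =====

-- Pre_ is exactly the inputs where A returns: A raises IndexError precisely when
-- row 0 has at least 2 columns and some later row is shorter than row 0 (its
-- diagonal walks then read a missing cell); it returns on all other inputs.
def Pre_solve (mat : List (List Int)) : Prop :=
  (mat.headD []).length ≤ 1 ∨ ∀ row ∈ mat.tail, (mat.headD []).length ≤ row.length
instance (mat : List (List Int)) : Decidable (Pre_solve mat) := by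
  unfold Pre_solve; infer_instance

def pvWitness_solve : List (List Int) := [[1, 2], [3, 4]]

def Spec_solve (mat : List (List Int)) (out : List (List Int)) : Prop := out = solve_alt mat
instance (mat : List (List Int)) (out : List (List Int)) : Decidable (Spec_solve mat out) := by
  unfold Spec_solve; infer_instance

-- ===== CLAIM (what is proved, stated in full; the proofs are below) =====
def Claim_equal_solve : Prop :=
  ∀ (mat : List (List Int)), Dom_solve mat → Pre_solve mat → Spec_solve mat (solve mat)

-- ===== LEMMAS AND PROOFS =====

-- mat[i][j] over Nat indices (the common value both ports read)
def pvV (mat : List (List Int)) (i j : Nat) : Int := (mat.getD i []).getD j 0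

-- values up-left of (i,j): mat[i-1][j-1], mat[i-2][j-2], …
def upL (mat : List (List Int)) : Nat → Nat → List Int
  | i + 1, j + 1 => pvV mat i j :: upL mat i j
  | _, _ => []

-- values from (i,j) down-right while in range: mat[i][j], mat[i+1][j+1], …
def dnL (mat : List (List Int)) (i j : Nat) : List Int :=
  if _h : i < mat.length ∧ j < (mat.headD []).length then
    pvV mat i j :: dnL mat (i + 1) (j + 1)
  else []
termination_by mat.length - i

-- the per-cell value both closed forms share
def pvF (mat : List (List Int)) (i j : Nat) : Int :=
  |((PySem.Set.ofList (upL mat i j)).length : Int) -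
    ((PySem.Set.ofList (dnL mat (i + 1) (j + 1))).length : Int)|

theorem len_eq_len_ofList {l t : List Int} (hn : l.Nodup) (hm : ∀ x, x ∈ l ↔ x ∈ t) :
    l.length = (PySem.Set.ofList t).length := by
  apply List.Perm.length_eq
  rw [List.perm_ext_iff_of_nodup hn (PySem.Set.nodup_ofList t)]
  intro a; rw [hm a, PySem.Set.mem_ofList]

theorem ofList_len_congr {l t : List Int} (hm : ∀ x, x ∈ l ↔ x ∈ t) :
    (PySem.Set.ofList l).length = (PySem.Set.ofList t).length :=
  len_eq_len_ofList (PySem.Set.nodup_ofList l)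
    (fun x => (PySem.Set.mem_ofList l x).trans (hm x))

theorem ofList_reverse_len (l : List Int) :
    (PySem.Set.ofList l.reverse).length = (PySem.Set.ofList l).length :=
  ofList_len_congr (fun x => List.mem_reverse)

theorem pyRangeNat (M : Nat) :
    PySem.List.pyRange 0 (M : Int) 1 = (List.range M).map (fun k => (k : Int)) := by
  rw [PySem.List.pyRange_one]
  simp [List.map_eq_flatMap]

theorem pvRow0 (mat : List (List Int)) :
    PySem.List.pyGetD mat 0 [] = mat.headD [] := by
  have h := PySem.List.pyGetD_natCast mat 0 ([] : List Int)
  simp at h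
  rw [h]
  cases mat <;> simp

theorem pvCell_natCast (mat : List (List Int)) (i j : Nat) :
    pvCell mat (i : Int) (j : Int) = pvV mat i j := by
  simp [pvCell, pvV, PySem.List.pyGetD_natCast]

-- ===== A-side characterisation =====

theorem whileTop_eq (mat : List (List Int)) :
    ∀ (i j : Nat) (s : PySem.Set Int),
      pvWhileTop mat ((i : Int) - 1) ((j : Int) - 1) s = PySem.Set.update s (upL mat i j) := by
  intro i
  induction i with
  | zero =>
    intro j s
    unfold pvWhileTop
    rw [dif_neg]
    · cases j <;> simp [upL, PySem.Set.update_nil]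
    · rintro ⟨h1, -⟩; omega
  | succ i ih =>
    intro j s
    cases j with
    | zero =>
      unfold pvWhileTop
      rw [dif_neg]
      · simp [upL, PySem.Set.update_nil]
      · rintro ⟨-, h2⟩; omega
    | succ j =>
      unfold pvWhileTop
      rw [dif_pos (by constructor <;> push_cast <;> omega)]
      have e1 : ((i : Nat) + 1 : Int) - 1 - 1 = (i : Int) - 1 := by ring
      have e2 : ((j : Nat) + 1 : Int) - 1 - 1 = (j : Int) - 1 := by ring
      have e3 : ((i : Nat) + 1 : Int) - 1 = ((i : Nat) : Int) := by ring
      have e4 : ((j : Nat) + 1 : Int) - 1 = ((j : Nat) : Int) := by ring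
      push_cast
      push_cast at e1 e2 e3 e4
      rw [e1, e2, e3, e4, pvCell_natCast, ih j]
      rw [show upL mat (i + 1) (j + 1) = pvV mat i j :: upL mat i j from rfl,
        PySem.Set.update_cons]

theorem whileBottom_eq (mat : List (List Int)) :
    ∀ (c k l : Nat) (s : PySem.Set Int), mat.length ≤ k + c →
      pvWhileBottom mat (k : Int) (l : Int) s = PySem.Set.update s (dnL mat k l) := by
  intro c
  induction c with
  | zero =>
    intro k l s hk
    unfold pvWhileBottom dnL
    rw [dif_neg (by simp only [PySem.List.len_eq]; push_cast; omega),
      dif_neg (by omega), PySem.Set.update_nil]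
  | succ c ih =>
    intro k l s hk
    by_cases hg : k < mat.length ∧ l < (mat.headD []).length
    · unfold pvWhileBottom dnL
      rw [dif_pos (by simp only [PySem.List.len_eq, pvRow0]; push_cast; omega), dif_pos hg]
      have e1 : (k : Int) + 1 = ((k + 1 : Nat) : Int) := by push_cast; ring
      have e2 : (l : Int) + 1 = ((l + 1 : Nat) : Int) := by push_cast; ring
      rw [pvCell_natCast, e1, e2, ih (k + 1) (l + 1) (PySem.Set.add s (pvV mat k l)) (by omega),
        PySem.Set.update_cons]
    · unfold pvWhileBottom dnL
      rw [dif_neg (by simp only [PySem.List.len_eq, pvRow0]; push_cast; omega),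
        dif_neg hg, PySem.Set.update_nil]

theorem solve_eq (mat : List (List Int)) :
    solve mat = (List.range mat.length).map (fun i =>
      (List.range (mat.headD []).length).map (fun j => pvF mat i j)) := by
  unfold solve
  simp only [PySem.List.len_eq, pvRow0, pyRangeNat]
  simp only [List.pure_def, List.bind_eq_flatMap, ← List.map_eq_flatMap, List.foldl_map]
  rw [PySem.List.foldl_append_singleton_eq_map]
  simp only [List.nil_append]
  apply List.map_congr_left
  intro i _
  rw [PySem.List.foldl_append_singleton_eq_map]
  simp only [List.nil_append]
  apply List.map_congr_left
  intro j _
  have hb : ((i : Int) + 1) = (((i + 1 : Nat)) : Int) := by push_cast; ring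
  have hb2 : ((j : Int) + 1) = (((j + 1 : Nat)) : Int) := by push_cast; ring
  simp only [hb, hb2, whileTop_eq mat i j,
    whileBottom_eq mat mat.length (i + 1) (j + 1) PySem.Set.empty (by omega)]
  simp [pvF, PySem.Set.empty, PySem.Set.update_nil_left, PySem.Set.len, abs_sub_comm]

-- ===== B-side characterisation =====

theorem pvNCols_eq (mat : List (List Int)) :
    pvNCols mat = ((mat.headD []).length : Int) := by
  cases mat <;> simp [pvNCols]


theorem sliceNegOne {A : Type} (xs : List A) :
    PySem.List.slice xs none (some (-1)) = xs.dropLast := by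
  simp only [PySem.List.slice, Int.reduceNeg, Order.lt_one_iff, PySem.List.clampIdx_neg_ofNat,
    tsub_zero, List.drop_zero]
  exact List.dropLast_eq_take.symm

theorem sliceFrom1 {A : Type} (xs : List A) :
    PySem.List.slice xs (some 1) none = xs.drop 1 := by
  rw [PySem.List.slice_from xs (by norm_num)]
  rfl

-- coordinates of the diagonal from (i,j), Nat version
def cellsN (mat : List (List Int)) (i j : Nat) : List (Nat × Nat) :=
  if _h : i < mat.length ∧ j < (mat.headD []).length then
    (i, j) :: cellsN mat (i + 1) (j + 1)
  else []
termination_by mat.length - i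

-- the (prefix-distinct, suffix-distinct) pair B records for a cell
def pvTB (mat : List (List Int)) (c : Int × Int) : Int × Int :=
  (((PySem.Set.ofList (upL mat c.1.toNat c.2.toNat)).length : Int),
   ((PySem.Set.ofList (dnL mat (c.1.toNat + 1) (c.2.toNat + 1))).length : Int))

theorem cellsB_eq (mat : List (List Int)) :
    ∀ (c i j : Nat), mat.length ≤ i + c →
      pvCellsB (mat.length : Int) ((mat.headD []).length : Int) (i : Int) (j : Int)
        = (cellsN mat i j).map (fun c => ((c.1 : Int), (c.2 : Int))) := by
  intro c
  induction c with
  | zero =>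
    intro i j h
    unfold pvCellsB cellsN
    rw [dif_neg (by push_cast; omega), dif_neg (by omega)]
    rfl
  | succ c ih =>
    intro i j h
    by_cases hg : i < mat.length ∧ j < (mat.headD []).length
    · unfold pvCellsB cellsN
      rw [dif_pos (by push_cast; omega), dif_pos hg]
      have e1 : (i : Int) + 1 = ((i + 1 : Nat) : Int) := by push_cast; ring
      have e2 : (j : Int) + 1 = ((j + 1 : Nat) : Int) := by push_cast; ring
      rw [e1, e2, ih (i + 1) (j + 1) (by omega)]
      rfl
    · unfold pvCellsB cellsN
      rw [dif_neg (by push_cast; omega), dif_neg hg]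
      rfl

theorem cellsN_map_pvV (mat : List (List Int)) :
    ∀ (c i j : Nat), mat.length ≤ i + c →
      (cellsN mat i j).map (fun p => pvV mat p.1 p.2) = dnL mat i j := by
  intro c
  induction c with
  | zero =>
    intro i j h
    unfold cellsN dnL
    rw [dif_neg (by omega), dif_neg (by omega)]
    rfl
  | succ c ih =>
    intro i j h
    by_cases hg : i < mat.length ∧ j < (mat.headD []).length
    · unfold cellsN dnL
      rw [dif_pos hg, dif_pos hg, List.map_cons, ih (i + 1) (j + 1) (by omega)]
    · unfold cellsN dnL
      rw [dif_neg hg, dif_neg hg]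
      rfl

theorem dnL_length (mat : List (List Int)) :
    ∀ (c i j : Nat), mat.length ≤ i + c →
      (dnL mat i j).length = min (mat.length - i) ((mat.headD []).length - j) := by
  intro c
  induction c with
  | zero =>
    intro i j h
    unfold dnL
    rw [dif_neg (by omega)]
    simp only [List.length_nil]
    omega
  | succ c ih =>
    intro i j h
    by_cases hg : i < mat.length ∧ j < (mat.headD []).length
    · unfold dnL
      rw [dif_pos hg, List.length_cons, ih (i + 1) (j + 1) (by omega)]
      omega
    · unfold dnL
      rw [dif_neg hg]
      simp only [List.length_nil]
      omega

theorem cellsN_getElem? (mat : List (List Int)) :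
    ∀ (t i j : Nat), t < (cellsN mat i j).length →
      (cellsN mat i j)[t]? = some (i + t, j + t) := by
  intro t
  induction t with
  | zero =>
    intro i j h
    by_cases hg : i < mat.length ∧ j < (mat.headD []).length
    · have hc : cellsN mat i j = (i, j) :: cellsN mat (i + 1) (j + 1) := by
        conv_lhs => unfold cellsN
        rw [dif_pos hg]
      rw [hc]
      simp
    · have hc : cellsN mat i j = [] := by unfold cellsN; rw [dif_neg hg]
      rw [hc] at h
      simp at h
  | succ t ih =>
    intro i j h
    by_cases hg : i < mat.length ∧ j < (mat.headD []).length
    · have hc : cellsN mat i j = (i, j) :: cellsN mat (i + 1) (j + 1) := by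
        conv_lhs => unfold cellsN
        rw [dif_pos hg]
      rw [hc] at h ⊢
      simp only [List.getElem?_cons_succ]
      rw [ih (i + 1) (j + 1) (by simpa using h)]
      simp only [Option.some_inj, Prod.mk.injEq]
      omega
    · have hc : cellsN mat i j = [] := by unfold cellsN; rw [dif_neg hg]
      rw [hc] at h
      simp at h

theorem cellsN_getElem (mat : List (List Int)) (t i j : Nat)
    (h : t < (cellsN mat i j).length) : (cellsN mat i j)[t] = (i + t, j + t) := by
  have h2 := cellsN_getElem? mat t i j h
  rwa [List.getElem?_eq_getElem h, Option.some_inj] at h2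

theorem mem_cellsN (mat : List (List Int)) (i j t : Nat)
    (h : t < (cellsN mat i j).length) : (i + t, j + t) ∈ cellsN mat i j := by
  rw [← cellsN_getElem mat t i j h]
  exact List.getElem_mem h

theorem dnL_drop_one (mat : List (List Int)) (i j : Nat) :
    (dnL mat i j).drop 1 = dnL mat (i + 1) (j + 1) := by
  by_cases hg : i < mat.length ∧ j < (mat.headD []).length
  · conv_lhs => unfold dnL
    rw [dif_pos hg]
    rfl
  · conv_lhs => unfold dnL
    rw [dif_neg hg]
    conv_rhs => unfold dnL
    rw [dif_neg (by omega)]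
    rfl

theorem dnL_drop (mat : List (List Int)) (i j : Nat) :
    ∀ t, (dnL mat i j).drop t = dnL mat (i + t) (j + t) := by
  intro t
  induction t generalizing i j with
  | zero => simp
  | succ t ih =>
    rw [show t + 1 = 1 + t by omega, ← List.drop_drop, dnL_drop_one, ih (i + 1) (j + 1)]
    congr 1 <;> omega

theorem dnL_getElem? (mat : List (List Int)) :
    ∀ (t i j : Nat), t < (dnL mat i j).length →
      (dnL mat i j)[t]? = some (pvV mat (i + t) (j + t)) := by
  intro t
  induction t with
  | zero =>
    intro i j h
    by_cases hg : i < mat.length ∧ j < (mat.headD []).length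
    · have hc : dnL mat i j = pvV mat i j :: dnL mat (i + 1) (j + 1) := by
        conv_lhs => unfold dnL
        rw [dif_pos hg]
      rw [hc]
      simp
    · have hc : dnL mat i j = [] := by unfold dnL; rw [dif_neg hg]
      rw [hc] at h
      simp at h
  | succ t ih =>
    intro i j h
    by_cases hg : i < mat.length ∧ j < (mat.headD []).length
    · have hc : dnL mat i j = pvV mat i j :: dnL mat (i + 1) (j + 1) := by
        conv_lhs => unfold dnL
        rw [dif_pos hg]
      rw [hc] at h ⊢
      simp only [List.getElem?_cons_succ]
      rw [ih (i + 1) (j + 1) (by simpa using h)]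
      simp only [Option.some_inj]
      congr 1 <;> omega
    · have hc : dnL mat i j = [] := by unfold dnL; rw [dif_neg hg]
      rw [hc] at h
      simp at h

theorem dnL_take_rev (mat : List (List Int)) (i j : Nat) (hij : i = 0 ∨ j = 0) :
    ∀ t, t ≤ (dnL mat i j).length →
      ((dnL mat i j).take t).reverse = upL mat (i + t) (j + t) := by
  intro t
  induction t with
  | zero =>
    intro _
    rcases hij with h | h <;> subst h
    · cases j <;> simp [upL]
    · cases i <;> simp [upL]
  | succ t ih =>
    intro h
    rw [List.take_succ, dnL_getElem? mat t i j (by omega)]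
    simp only [Option.toList_some, List.reverse_append, List.reverse_singleton,
      List.singleton_append]
    rw [ih (by omega)]
    rfl

-- one incremental pass over values: the outputs are the distinct counts of the prefixes
theorem scan_eq {A : Type} (v : A → Int) :
    ∀ (cs : List A) (acc : List Int) (s : PySem.Set Int),
      (cs.foldl (fun st c =>
          (st.1 ++ [PySem.Set.len (PySem.Set.add st.2 (v c))], PySem.Set.add st.2 (v c)))
        (acc, s)).1 =
        acc ++ (List.range cs.length).map (fun t =>
          (((PySem.Set.update s ((cs.take (t + 1)).map v)).length : Int))) := by
  intro cs
  induction cs with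
  | nil => intro acc s; simp
  | cons c cs ih =>
    intro acc s
    simp only [List.foldl_cons]
    rw [ih]
    rw [List.length_cons, List.range_succ_eq_map]
    simp only [List.map_cons, List.map_map, List.take_succ_cons, List.take_zero]
    rw [List.append_assoc, List.singleton_append]
    congr 1


theorem map_range_reverse {f g : Nat → Int} {K : Nat} (h : ∀ t, t < K → f (K - 1 - t) = g t) :
    (List.map f (List.range K)).reverse = List.map g (List.range K) := by
  apply List.ext_getElem
  · simp
  · intro t h1 h2
    simp only [List.length_reverse, List.length_map, List.length_range] at h1 h2
    rw [List.getElem_reverse]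
    simp only [List.getElem_map, List.getElem_range, List.length_map, List.length_range]
    exact h t h2 ▸ rfl

theorem zipDiag (mat : List (List Int)) (i j : Nat) (hij : i = 0 ∨ j = 0) :
    (pvCellsB (mat.length : Int) ((mat.headD []).length : Int) (i : Int) (j : Int)).zip
        ((((PySem.List.slice
              (pvCellsB (mat.length : Int) ((mat.headD []).length : Int) (i : Int) (j : Int))
              none (some (-1))).foldl (pvScanStep mat) ([(0 : Int)], PySem.Set.empty)).1).zip
          ((((PySem.List.slice
              (pvCellsB (mat.length : Int) ((mat.headD []).length : Int) (i : Int) (j : Int))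
              (some 1) none).reverse).foldl (pvScanStep mat)
                ([(0 : Int)], PySem.Set.empty)).1.reverse))
      = (pvCellsB (mat.length : Int) ((mat.headD []).length : Int) (i : Int) (j : Int)).map
          (fun c => (c, pvTB mat c)) := by
  have hcb := cellsB_eq mat mat.length i j (by omega)
  have hstep : ∀ (st : List Int × PySem.Set Int) (c : Nat × Nat),
      pvScanStep mat st ((c.1 : Int), (c.2 : Int)) =
        (st.1 ++ [PySem.Set.len (PySem.Set.add st.2 (pvV mat c.1 c.2))],
          PySem.Set.add st.2 (pvV mat c.1 c.2)) := by
    intro st c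
    simp [pvScanStep, pvCell_natCast]
  rw [hcb, sliceNegOne, sliceFrom1]
  rw [← List.map_dropLast, ← List.map_drop, ← List.map_reverse]
  rw [List.foldl_map, List.foldl_map]
  simp only [hstep]
  simp only [scan_eq (fun (c : Nat × Nat) => pvV mat c.1 c.2)]
  simp only [List.length_dropLast, List.length_reverse, List.length_drop]
  have hv : (cellsN mat i j).map (fun c => pvV mat c.1 c.2) = dnL mat i j :=
    cellsN_map_pvV mat mat.length i j (by omega)
  by_cases hnil : cellsN mat i j = []
  · simp [hnil]
  · have hL : 1 ≤ (cellsN mat i j).length := by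
      cases hc : cellsN mat i j
      · exact absurd hc hnil
      · simp [hc]
    have hlv : (dnL mat i j).length = (cellsN mat i j).length := by
      rw [← hv, List.length_map]
    obtain ⟨K, hK⟩ : ∃ K, (cellsN mat i j).length = K + 1 :=
      ⟨(cellsN mat i j).length - 1, by omega⟩
    -- the prefix-count list in closed form
    have htop : [(0 : Int)] ++ (List.range ((cellsN mat i j).length - 1)).map (fun t =>
          ((PySem.Set.update PySem.Set.empty
            (((cellsN mat i j).dropLast.take (t + 1)).map (fun c => pvV mat c.1 c.2))).length : Int))
        = (List.range ((cellsN mat i j).length)).map (fun t =>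
            ((PySem.Set.ofList ((dnL mat i j).take t)).length : Int)) := by
      rw [hK]
      simp only [Nat.add_sub_cancel]
      rw [List.range_succ_eq_map]
      simp only [List.map_cons, List.map_map, List.singleton_append]
      refine List.cons_eq_cons.mpr ⟨by simp, ?_⟩
      apply List.map_congr_left
      intro t ht
      simp only [List.mem_range] at ht
      simp only [Function.comp_apply]
      rw [List.map_take, List.map_dropLast, hv, List.dropLast_eq_take, List.take_take,
        PySem.Set.update_empty]
      rw [show min (t + 1) ((dnL mat i j).length - 1) = t + 1 from by omega]
    -- the suffix-count list in closed form
    have hbot : ([(0 : Int)] ++ (List.range ((cellsN mat i j).length - 1)).map (fun t =>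
          ((PySem.Set.update PySem.Set.empty
            ((((cellsN mat i j).drop 1).reverse.take (t + 1)).map
              (fun c => pvV mat c.1 c.2))).length : Int))).reverse
        = (List.range ((cellsN mat i j).length)).map (fun t =>
            ((PySem.Set.ofList ((dnL mat i j).drop (t + 1))).length : Int)) := by
      rw [hK]
      simp only [Nat.add_sub_cancel]
      rw [List.range_succ, List.map_append, List.reverse_append]
      simp only [List.reverse_singleton, List.map_cons, List.map_nil, List.singleton_append,
        List.reverse_cons]
      congr 1
      · apply map_range_reverse
        intro t ht
        rw [List.map_take, List.map_reverse, List.map_drop, hv, List.take_reverse,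
          PySem.Set.update_empty, ofList_reverse_len, List.drop_drop]
        simp only [List.length_drop]
        rw [show 1 + ((dnL mat i j).length - 1 - (K - 1 - t + 1)) = t + 1 from by omega]
      · rw [List.drop_of_length_le (by omega)]
        simp
    rw [htop, hbot]
    have hcells : (cellsN mat i j).map (fun c => (((c.1 : Nat) : Int), ((c.2 : Nat) : Int)))
        = (List.range ((cellsN mat i j).length)).map (fun t =>
            (((i + t : Nat) : Int), ((j + t : Nat) : Int))) := by
      apply List.ext_getElem
      · simp
      · intro t h1 h2
        simp only [List.getElem_map, List.getElem_range]
        rw [cellsN_getElem mat t i j (by simpa using h1)]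
    rw [hcells, List.zip_map', List.zip_map', List.map_map]
    apply List.map_congr_left
    intro t ht
    simp only [List.mem_range] at ht
    simp only [Function.comp_apply, pvTB, Int.toNat_natCast, Prod.mk.injEq, true_and]
    constructor
    · rw [← dnL_take_rev mat i j hij t (by omega), ofList_reverse_len]
    · have hdr := dnL_drop mat i j (t + 1)
      rw [show i + (t + 1) = i + t + 1 from by omega,
        show j + (t + 1) = j + t + 1 from by omega] at hdr
      rw [← hdr]


theorem getD_foldl_insertTB (mat : List (List Int)) :
    ∀ (cl : List (Int × Int)) (d : PySem.Dict (Int × Int) Int) (q : Int × Int),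
      ((cl.map (fun c => (c, pvTB mat c))).foldl
          (fun d p => PySem.Dict.insert d p.1 |p.2.1 - p.2.2|) d).getD q 0
        = if q ∈ cl then |(pvTB mat q).1 - (pvTB mat q).2| else d.getD q 0 := by
  intro cl
  induction cl with
  | nil => intro d q; simp
  | cons c cl ih =>
    intro d q
    simp only [List.map_cons, List.foldl_cons]
    rw [ih]
    by_cases hq : q ∈ cl
    · simp [hq]
    · rw [if_neg hq, PySem.Dict.getD_insert]
      by_cases hqc : q = c
      · subst hqc; simp
      · simp [hqc, hq]

theorem cellsN_length (mat : List (List Int)) (i j : Nat) :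
    (cellsN mat i j).length = min (mat.length - i) ((mat.headD []).length - j) := by
  have h := dnL_length mat mat.length i j (by omega)
  rw [← cellsN_map_pvV mat mat.length i j (by omega), List.length_map] at h
  exact h

theorem getD_valsFold (mat : List (List Int)) :
    ∀ (sps : List (Int × Int)) (d : PySem.Dict (Int × Int) Int) (q : Int × Int),
      (∀ sp ∈ sps, ∃ a b : Nat, sp = ((a : Int), (b : Int)) ∧ (a = 0 ∨ b = 0)) →
      (sps.foldl (fun vals sp =>
          ((pvCellsB (mat.length : Int) ((mat.headD []).length : Int) sp.1 sp.2).zip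
            ((((PySem.List.slice
                  (pvCellsB (mat.length : Int) ((mat.headD []).length : Int) sp.1 sp.2)
                  none (some (-1))).foldl (pvScanStep mat)
                    ([(0 : Int)], PySem.Set.empty)).1).zip
              ((((PySem.List.slice
                  (pvCellsB (mat.length : Int) ((mat.headD []).length : Int) sp.1 sp.2)
                  (some 1) none).reverse).foldl (pvScanStep mat)
                    ([(0 : Int)], PySem.Set.empty)).1.reverse))).foldl
            (fun d p => PySem.Dict.insert d p.1 |p.2.1 - p.2.2|) vals) d).getD q 0
      = if ∃ sp ∈ sps,
            q ∈ pvCellsB (mat.length : Int) ((mat.headD []).length : Int) sp.1 sp.2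
          then |(pvTB mat q).1 - (pvTB mat q).2| else d.getD q 0 := by
  intro sps
  induction sps with
  | nil => intro d q _; simp
  | cons sp sps ih =>
    intro d q hshape
    obtain ⟨a, b, hab, hz⟩ := hshape sp (by simp)
    simp only [List.foldl_cons]
    rw [ih _ q (fun x hx => hshape x (by simp [hx]))]
    subst hab
    rw [zipDiag mat a b hz, getD_foldl_insertTB]
    by_cases h1 : ∃ x ∈ sps,
        q ∈ pvCellsB (mat.length : Int) ((mat.headD []).length : Int) x.1 x.2
    · rw [if_pos h1, if_pos (by obtain ⟨x, hx1, hx2⟩ := h1; exact ⟨x, by simp [hx1], hx2⟩)]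
    · rw [if_neg h1]
      by_cases h2 : q ∈ pvCellsB (mat.length : Int) ((mat.headD []).length : Int)
          ((a : Int), (b : Int)).1 ((a : Int), (b : Int)).2
      · rw [if_pos h2, if_pos ⟨((a : Int), (b : Int)), by simp, h2⟩]
      · rw [if_neg h2, if_neg (by
          rintro ⟨x, hx1, hx2⟩
          rcases List.mem_cons.mp hx1 with hx | hx
          · exact h2 (hx ▸ hx2)
          · exact h1 ⟨x, hx, hx2⟩)]

theorem mem_starts_cells (mat : List (List Int)) (iN jN : Nat)
    (hi : iN < mat.length) (hj : jN < (mat.headD []).length) :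
    ∃ sp ∈ (PySem.List.pyRange 0 (mat.length : Int) 1).map (fun i => (i, (0 : Int))) ++
        (PySem.List.pyRange 1 ((mat.headD []).length : Int) 1).map (fun j => ((0 : Int), j)),
      ((iN : Int), (jN : Int)) ∈
        pvCellsB (mat.length : Int) ((mat.headD []).length : Int) sp.1 sp.2 := by
  have hcell : ∀ (a b t : Nat), t < (cellsN mat a b).length →
      ((a + t : Nat), (b + t : Nat)) ∈ cellsN mat a b := mem_cellsN mat
  by_cases hle : jN ≤ iN
  · refine ⟨((iN - jN : Nat), (0 : Int)), ?_, ?_⟩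
    · apply List.mem_append_left
      simp only [List.mem_map]
      exact ⟨((iN - jN : Nat) : Int), by rw [PySem.List.mem_pyRange_one]; push_cast; omega, rfl⟩
    · have h0 : (0 : Int) = ((0 : Nat) : Int) := by simp
      simp only [h0]
      rw [cellsB_eq mat mat.length (iN - jN) 0 (by omega)]
      have ht : jN < (cellsN mat (iN - jN) 0).length := by
        rw [cellsN_length]
        omega
      have hm := hcell (iN - jN) 0 jN ht
      rw [show iN - jN + jN = iN from by omega, show 0 + jN = jN from by omega] at hm
      exact List.mem_map_of_mem hm
  · refine ⟨((0 : Int), ((jN - iN : Nat) : Int)), ?_, ?_⟩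
    · apply List.mem_append_right
      simp only [List.mem_map]
      exact ⟨((jN - iN : Nat) : Int), by rw [PySem.List.mem_pyRange_one]; push_cast; omega, rfl⟩
    · have h0 : (0 : Int) = ((0 : Nat) : Int) := by simp
      simp only [h0]
      rw [cellsB_eq mat mat.length 0 (jN - iN) (by omega)]
      have ht : iN < (cellsN mat 0 (jN - iN)).length := by
        rw [cellsN_length]
        omega
      have hm := hcell 0 (jN - iN) iN ht
      rw [show 0 + iN = iN from by omega, show jN - iN + iN = jN from by omega] at hm
      exact List.mem_map_of_mem hm

theorem solve_alt_eq (mat : List (List Int)) :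
    solve_alt mat = (List.range mat.length).map (fun i =>
      (List.range (mat.headD []).length).map (fun j => pvF mat i j)) := by
  unfold solve_alt
  simp only [PySem.List.len_eq, pvNCols_eq]
  have hshape : ∀ sp ∈ (PySem.List.pyRange 0 (mat.length : Int) 1).map (fun i => (i, (0 : Int))) ++
      (PySem.List.pyRange 1 ((mat.headD []).length : Int) 1).map (fun j => ((0 : Int), j)),
      ∃ a b : Nat, sp = ((a : Int), (b : Int)) ∧ (a = 0 ∨ b = 0) := by
    intro sp hsp
    rcases List.mem_append.mp hsp with h | h
    · obtain ⟨x, hx, rfl⟩ := List.mem_map.mp h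
      rw [PySem.List.mem_pyRange_one] at hx
      exact ⟨x.toNat, 0, by simp [Int.toNat_of_nonneg hx.1], Or.inr rfl⟩
    · obtain ⟨x, hx, rfl⟩ := List.mem_map.mp h
      rw [PySem.List.mem_pyRange_one] at hx
      exact ⟨0, x.toNat, by simp [Int.toNat_of_nonneg (by omega : (0 : Int) ≤ x)], Or.inl rfl⟩
  generalize hS : ((PySem.List.pyRange 0 (mat.length : Int) 1).map (fun i => (i, (0 : Int))) ++
      (PySem.List.pyRange 1 ((mat.headD []).length : Int) 1).map
        (fun j => ((0 : Int), j))) = S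
  rw [hS] at hshape
  rw [pyRangeNat mat.length, pyRangeNat (mat.headD []).length]
  simp only [List.pure_def, List.bind_eq_flatMap, ← List.map_eq_flatMap]
  simp only [List.map_map]
  apply List.map_congr_left
  intro iN hi
  simp only [List.mem_range] at hi
  simp only [Function.comp_apply]
  apply List.map_congr_left
  intro jN hj
  simp only [List.mem_range] at hj
  simp only [Function.comp_apply]
  rw [getD_valsFold mat S PySem.Dict.empty ((iN : Int), (jN : Int)) hshape]
  rw [if_pos (hS ▸ mem_starts_cells mat iN jN hi hj)]
  simp [pvTB, pvF, Int.toNat_natCast]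

-- ===== VERDICT (by name: the statement is the Claim_ definition above) =====
theorem solve_spec : Claim_equal_solve := by
  intro mat _ _
  unfold Spec_solve
  rw [solve_eq, solve_alt_eq]
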